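-- pv_equiv track=rewrite | github.com/Nickdiaz14/Binary-Puzzle | solve.py | check_cols_ga
-- ===== SOURCE A (Python) =====
-- def check_cols_ga(matrix):
--     check = []
--     n = len(matrix)
--     matrixt = list(zip(*matrix))
--     for col in matrixt:
--         for i in range(n-2):
--             if col[i] == col[i+1] == col[i+2]:
--                 check.append(2)
--         if sum(col) != int((n)/2):
--             check.append(3)
--     return check
-- ===== SOURCE B (Python) =====
-- def check_cols_ga(matrix):
--     # Single run-length pass per column instead of the O(n) window rescan.
--     check = []
--     half = len(matrix) // 2
--     for col in zip(*matrix):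
--         run = 0
--         prev = None
--         for x in col:
--             run = run + 1 if x == prev else 1
--             if run >= 3:
--                 check.append(2)
--             prev = x
--         if sum(col) != half:
--             check.append(3)
--     return check
-- ===== Notes on version B (the rewrite author's own statement) =====
-- stated objective: alternative
-- what changed: Replaces the per-column sliding-window rescan for i in range(n-2) with a single run-length pass (run counter reset on change, emit a 2 whenever run >= 3), keeping the per-column sum check.
import Mathlib
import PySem

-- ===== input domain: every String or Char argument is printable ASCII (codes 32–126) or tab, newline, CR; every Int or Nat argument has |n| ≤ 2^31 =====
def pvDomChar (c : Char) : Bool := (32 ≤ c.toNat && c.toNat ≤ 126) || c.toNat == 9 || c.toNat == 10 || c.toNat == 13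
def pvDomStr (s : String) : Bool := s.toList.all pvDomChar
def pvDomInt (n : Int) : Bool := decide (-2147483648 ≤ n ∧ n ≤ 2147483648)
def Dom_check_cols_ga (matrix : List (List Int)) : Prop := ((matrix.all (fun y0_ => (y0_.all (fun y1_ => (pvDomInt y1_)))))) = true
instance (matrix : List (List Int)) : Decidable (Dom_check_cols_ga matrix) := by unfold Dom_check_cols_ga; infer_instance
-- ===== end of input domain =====

-- B replaces A's per-column sliding-window rescan with a single run-length pass (same cost class; alternative decomposition).
-- Shared helper: zip(*matrix) — the truncating transpose both Pythons compute.
-- Fuel = length of the first row: zip stops at the shortest row, which is reached no later than the first.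
def pvTranspGo : Nat → List (List Int) → List (List Int)
  | 0, _ => []
  | f + 1, m =>
    if m.any (fun r => r.isEmpty) then []
    else (m.map (fun r => r.headD 0)) :: pvTranspGo f (m.map List.tail)

def pvTransp (m : List (List Int)) : List (List Int) :=
  match m with
  | [] => []
  | r :: _ => pvTranspGo r.length m

-- ===== PORT A =====
-- col[i] is always in range (each column has one entry per row, i+2 ≤ n-1), so pyGetD's default is never used.
-- int(n/2) with n = len(matrix) ≥ 0 is floor division.
def check_cols_ga (matrix : List (List Int)) : List Int :=
  let n := matrix.length
  let matrixt := pvTransp matrix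
  matrixt.foldl
    (fun check col =>
      let check1 := (PySem.List.pyRange 0 ((n : Int) - 2) 1).foldl
        (fun acc i =>
          if PySem.List.pyGetD col i 0 = PySem.List.pyGetD col (i + 1) 0 ∧
             PySem.List.pyGetD col (i + 1) 0 = PySem.List.pyGetD col (i + 2) 0
          then acc ++ [2] else acc) check
      if col.sum ≠ PySem.Int.floordiv (n : Int) 2 then check1 ++ [3] else check1)
    []

-- ===== PORT B =====
-- The inner 'for x in col' loop of Source B: state = (prev, run, check).
def pvBRun : Option Int → Nat → List Int → List Int → List Int
  | _, _, check, [] => check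
  | prev, run, check, x :: rest =>
    let run' := if some x = prev then run + 1 else 1
    pvBRun (some x) run' (if 3 ≤ run' then check ++ [2] else check) rest

def check_cols_ga_alt (matrix : List (List Int)) : List Int :=
  let half := PySem.Int.floordiv (matrix.length : Int) 2
  (pvTransp matrix).foldl
    (fun check col =>
      let check1 := pvBRun none 0 check col
      if col.sum ≠ half then check1 ++ [3] else check1)
    []

-- ===== PRECONDITION & SPEC =====
def Spec_check_cols_ga (matrix : List (List Int)) (out : List Int) : Prop := out = check_cols_ga_alt matrix
instance (matrix : List (List Int)) (out : List Int) : Decidable (Spec_check_cols_ga matrix out) := by unfold Spec_check_cols_ga; infer_instance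

-- ===== CLAIM (what is proved, stated in full; the proofs are below) =====
def Claim_equal_check_cols_ga : Prop := ∀ (matrix : List (List Int)), Dom_check_cols_ga matrix → Spec_check_cols_ga matrix (check_cols_ga matrix)

-- ===== LEMMAS AND PROOFS =====

-- The list of 2s the window scan emits on a column, structurally.
def pvWins : List Int → List Int
  | a :: b :: c :: rest => (if a = b ∧ b = c then [(2 : Int)] else []) ++ pvWins (b :: c :: rest)
  | _ => []

-- The window scan written over natural indices (n = row count).
def pvWinsN (n : Nat) (c : List Int) : List Int :=
  ((List.range (n - 2)).filter
    (fun k => decide (c.getD k 0 = c.getD (k + 1) 0 ∧ c.getD (k + 1) 0 = c.getD (k + 2) 0))).map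
    (fun _ => (2 : Int))

theorem pvTranspGo_len : ∀ (f : Nat) (m : List (List Int)) (c : List Int),
    c ∈ pvTranspGo f m → c.length = m.length := by
  intro f
  induction f with
  | zero => intro m c h; simp [pvTranspGo] at h
  | succ f ih =>
    intro m c h
    simp only [pvTranspGo] at h
    split at h
    · simp at h
    · rcases List.mem_cons.mp h with h | h
      · subst h; simp
      · have := ih _ _ h; simpa using this

theorem pvBRun_stable : ∀ (xs : List Int) (p : Int) (r : Nat) (check : List Int),
    2 ≤ r → pvBRun (some p) r check xs = pvBRun (some p) 2 check xs := by
  intro xs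
  induction xs with
  | nil => intros; rfl
  | cons x rest ih =>
    intro p r check hr
    simp only [pvBRun]
    by_cases hx : some x = some p
    · rw [if_pos hx, if_pos hx, if_pos (show 3 ≤ r + 1 by omega), if_pos (show 3 ≤ 2 + 1 by omega)]
      rw [ih x (r + 1) _ (by omega), ih x (2 + 1) _ (by omega)]
    · rw [if_neg hx, if_neg hx]

theorem pvBRun_win : ∀ (rest : List Int) (a b : Int) (check : List Int),
    pvBRun (some b) (if a = b then 2 else 1) check rest = check ++ pvWins (a :: b :: rest) := by
  intro rest
  induction rest with
  | nil =>
    intro a b check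
    by_cases hab : a = b <;> simp [pvBRun, pvWins]
  | cons x r ih =>
    intro a b check
    have hwins : pvWins (a :: b :: x :: r) = (if a = b ∧ b = x then [(2:Int)] else []) ++ pvWins (b :: x :: r) := rfl
    rw [hwins]
    simp only [pvBRun]
    by_cases hxb : some x = some b
    · have hxb' : x = b := by injection hxb
      rw [if_pos hxb]
      by_cases hab : a = b
      · rw [if_pos hab, if_pos (show 3 ≤ 2 + 1 by omega)]
        rw [pvBRun_stable r x (2+1) _ (by omega)]
        have := ih b x (check ++ [2])
        rw [if_pos hxb'.symm] at this
        rw [this, if_pos ⟨hab, hxb'.symm⟩]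
        simp
      · rw [if_neg hab, if_neg (show ¬ (3:Nat) ≤ 1 + 1 by omega)]
        have := ih b x check
        rw [if_pos hxb'.symm] at this
        rw [pvBRun_stable r x (1+1) _ (by omega), pvBRun_stable r x 2 _ (by omega)] at *
        rw [this, if_neg (by simp [hab])]
        simp
    · have hxb' : ¬ x = b := fun h => hxb (by rw [h])
      rw [if_neg hxb, if_neg (show ¬ (3:Nat) ≤ 1 by omega)]
      have := ih b x check
      rw [if_neg (fun h => hxb' h.symm)] at this
      rw [this, if_neg (fun h => hxb' h.2.symm)]
      simp

theorem pvBRun_eq_wins : ∀ (c check : List Int), pvBRun none 0 check c = check ++ pvWins c := by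
  intro c check
  match c with
  | [] => simp [pvBRun, pvWins]
  | [a] => simp [pvBRun, pvWins]
  | a :: b :: rest =>
    simp only [pvBRun, reduceCtorEq, if_neg, show ¬ (3:Nat) ≤ 0 + 1 by omega, not_false_iff]
    by_cases hba : some b = some a
    · have h : b = a := by injection hba
      rw [if_pos hba, if_neg (show ¬ (3:Nat) ≤ 0 + 1 + 1 by omega)]
      have := pvBRun_win rest a b check
      rw [if_pos h.symm] at this
      rw [pvBRun_stable rest b (0+1+1) _ (by omega), pvBRun_stable rest b 2 _ (by omega)] at *
      exact this
    · rw [if_neg hba, if_neg (show ¬ (3:Nat) ≤ 1 by omega)]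
      have := pvBRun_win rest a b check
      rw [if_neg (fun h => hba (by rw [h]))] at this
      exact this

theorem pvShift (p : Nat → Bool) (m : Nat) :
    ((List.range (m + 1)).filter p).map (fun _ => (2 : Int)) =
      (if p 0 then [(2 : Int)] else []) ++
        ((List.range m).filter (fun k => p (k + 1))).map (fun _ => (2 : Int)) := by
  rw [List.range_succ_eq_map, List.filter_cons, List.filter_map]
  by_cases h0 : p 0
  · simp [h0, Function.comp_def, Nat.succ_eq_add_one, List.map_map]
  · simp [h0, Function.comp_def, Nat.succ_eq_add_one, List.map_map]

theorem pvWinsN_eq_wins : ∀ (c : List Int), pvWinsN c.length c = pvWins c := by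
  intro c
  induction c with
  | nil => rfl
  | cons a tail ih =>
    match tail, ih with
    | [], _ => rfl
    | [b], _ => rfl
    | b :: cc :: r, ih =>
      rw [pvWinsN, show (a :: b :: cc :: r).length - 2 = r.length + 1 from by simp, pvShift]
      rw [show pvWins (a :: b :: cc :: r) = (if a = b ∧ b = cc then [(2:Int)] else []) ++ pvWins (b :: cc :: r) from rfl]
      rw [← ih, pvWinsN, show (b :: cc :: r).length - 2 = r.length from by simp]
      congr 1
      simp [List.getD]

theorem pvAInner_eq (c : List Int) (n : Nat) (check : List Int) :
    (PySem.List.pyRange 0 ((n : Int) - 2) 1).foldl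
      (fun acc i =>
        if PySem.List.pyGetD c i 0 = PySem.List.pyGetD c (i + 1) 0 ∧
           PySem.List.pyGetD c (i + 1) 0 = PySem.List.pyGetD c (i + 2) 0
        then acc ++ [2] else acc) check = check ++ pvWinsN n c := by
  rw [PySem.List.foldl_append_ite]
  congr 1
  rw [PySem.List.pyRange_one]
  have ht : (((n : Int) - 2) - 0).toNat = n - 2 := by omega
  rw [ht]
  simp only [List.filter_map, List.map_map, pvWinsN]
  congr 1
  apply List.filter_congr
  intro k _
  have e1 : (0 : Int) + (k : Int) = ((k : Nat) : Int) := by omega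
  have e2 : ((k : Int) + 1) = ((k + 1 : Nat) : Int) := by push_cast; ring
  have e3 : ((k : Int) + 2) = ((k + 2 : Nat) : Int) := by push_cast; ring
  simp only [Function.comp_def, e1, e2, e3, PySem.List.pyGetD_natCast]

-- ===== VERDICT (by name: the statement is the Claim_ definition above) =====
theorem check_cols_ga_spec : Claim_equal_check_cols_ga := by
  intro matrix _
  unfold Spec_check_cols_ga check_cols_ga check_cols_ga_alt
  apply PySem.List.foldl_congr_mem
  intro acc col hmem
  have hlen : col.length = matrix.length := by
    cases matrix with
    | nil => simp [pvTransp] at hmem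
    | cons r m => exact pvTranspGo_len _ _ _ hmem
  rw [pvAInner_eq col matrix.length acc, pvBRun_eq_wins col acc, ← hlen, pvWinsN_eq_wins]
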